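-- pv_equiv track=rewrite | github.com/calvinz168/naomi-battlesnake | server_logic.py | avoid_body
-- ===== SOURCE A (Python) =====
-- from typing import List, Dict
--
-- def avoid_body(my_head: Dict[str, int], my_body: List[dict], possible_moves: List[str]) -> List[str]:
--     for i in range(len(my_body)):
--         if ((my_head["x"] + 1 == my_body[i]["x"]) and (my_head["y"] == my_body[i]["y"])):
--             while "right" in possible_moves:
--                 possible_moves.remove("right")
--
--         if ((my_head["x"] - 1 == my_body[i]["x"]) and (my_head["y"] == my_body[i]["y"])):
--             while "left" in possible_moves:
--                 possible_moves.remove("left")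
--
--         if ((my_head["y"] + 1 == my_body[i]["y"]) and (my_head["x"] == my_body[i]["x"])):
--             while "up" in possible_moves:
--                 possible_moves.remove("up")
--
--         if ((my_head["y"] - 1 == my_body[i]["y"]) and (my_head["x"] == my_body[i]["x"])):
--             while "down" in possible_moves:
--                 possible_moves.remove("down")
--
--     return possible_moves
-- ===== SOURCE B (Python) =====
-- def avoid_body(my_head, my_body, possible_moves):
--     if my_body:
--         blocked = {(seg["x"], seg["y"]) for seg in my_body}
--         x, y = my_head["x"], my_head["y"]
--         to_remove = {move for move, pos in
--                      (("right", (x + 1, y)), ("left", (x - 1, y)),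
--                       ("up", (x, y + 1)), ("down", (x, y - 1)))
--                      if pos in blocked}
--         possible_moves[:] = [m for m in possible_moves if m not in to_remove]
--     return possible_moves
-- ===== Notes on version B (the rewrite author's own statement) =====
-- stated objective: simpler
-- what changed: A scans every body segment and, per matching segment, strips a move by a repeated remove()-loop; B builds a set of occupied coordinates once, tests the four head-neighbour cells against it, and drops the blocked moves with a single filter.
import Mathlib
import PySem

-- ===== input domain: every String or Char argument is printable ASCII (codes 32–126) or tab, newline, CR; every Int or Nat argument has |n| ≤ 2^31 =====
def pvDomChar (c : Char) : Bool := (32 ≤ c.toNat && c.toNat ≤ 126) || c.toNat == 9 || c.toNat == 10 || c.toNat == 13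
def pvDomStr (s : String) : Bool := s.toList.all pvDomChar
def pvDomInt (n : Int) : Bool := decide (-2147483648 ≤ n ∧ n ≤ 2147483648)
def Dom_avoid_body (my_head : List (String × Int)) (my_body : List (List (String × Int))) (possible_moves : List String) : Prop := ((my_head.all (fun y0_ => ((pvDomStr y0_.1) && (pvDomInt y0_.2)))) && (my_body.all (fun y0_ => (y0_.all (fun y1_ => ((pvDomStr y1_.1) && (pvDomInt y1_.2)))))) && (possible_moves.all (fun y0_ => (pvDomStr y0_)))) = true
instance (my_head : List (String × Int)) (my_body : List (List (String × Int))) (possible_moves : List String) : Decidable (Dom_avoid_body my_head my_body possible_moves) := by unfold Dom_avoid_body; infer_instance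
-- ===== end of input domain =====

-- B replaces A's per-segment scan (each stripping moves with a repeated remove-loop) by one blocked-coordinate
-- set built from the body and a single filter of the four head-neighbour moves: simpler, one pass over the body.
-- Equivalence is about the RETURN value; both Pythons mutate possible_moves in place to the same final contents.

-- ===== PORT A =====
-- 'while m in pm: pm.remove(m)' — list.remove removes the first occurrence (= List.erase), looped until absent
def pvRemoveAll (pm : List String) (m : String) : List String :=
  if h : pm.contains m then pvRemoveAll (pm.erase m) m else pm
termination_by pm.length
decreasing_by
  have := List.length_erase_of_mem (l := pm) (a := m) (by simpa using h)
  have : 0 < pm.length := List.length_pos_of_mem (by simpa using h)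
  omega

-- the body of A's for-loop (one iteration, for segment my_body[i])
def pvStep (my_head : List (String × Int)) (pm : List String) (seg : List (String × Int)) : List String :=
  let hx := PySem.Dict.getD ⟨my_head⟩ "x" 0
  let hy := PySem.Dict.getD ⟨my_head⟩ "y" 0
  let sx := PySem.Dict.getD ⟨seg⟩ "x" 0
  let sy := PySem.Dict.getD ⟨seg⟩ "y" 0
  let pm := if hx + 1 == sx && hy == sy then pvRemoveAll pm "right" else pm
  let pm := if hx - 1 == sx && hy == sy then pvRemoveAll pm "left" else pm
  let pm := if hy + 1 == sy && hx == sx then pvRemoveAll pm "up" else pm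
  let pm := if hy - 1 == sy && hx == sx then pvRemoveAll pm "down" else pm
  pm

def avoid_body (my_head : List (String × Int)) (my_body : List (List (String × Int))) (possible_moves : List String) : List String :=
  my_body.foldl (pvStep my_head) possible_moves

-- ===== PORT B =====
-- the 4-tuple of (move, neighbour coordinate) candidates from Source B
def pvCands (x y : Int) : List (String × (Int × Int)) :=
  [("right", (x + 1, y)), ("left", (x - 1, y)), ("up", (x, y + 1)), ("down", (x, y - 1))]

def avoid_body_alt (my_head : List (String × Int)) (my_body : List (List (String × Int))) (possible_moves : List String) : List String :=
  if my_body.isEmpty then possible_moves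
  else
    let blocked : PySem.Set (Int × Int) :=
      PySem.Set.ofList (my_body.map (fun seg => (PySem.Dict.getD ⟨seg⟩ "x" 0, PySem.Dict.getD ⟨seg⟩ "y" 0)))
    let x := PySem.Dict.getD ⟨my_head⟩ "x" 0
    let y := PySem.Dict.getD ⟨my_head⟩ "y" 0
    let toRemove : PySem.Set String :=
      PySem.Set.ofList (((pvCands x y).filter (fun p => PySem.Set.contains blocked p.2)).map Prod.fst)
    possible_moves.filter (fun m => !(PySem.Set.contains toRemove m))

-- ===== PRECONDITION & SPEC =====
-- Pre_ excludes exactly the inputs where A raises KeyError: a nonempty body with "x"/"y" missing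
-- from the head dict or from some body segment (all four condition heads access them each iteration).
def Pre_avoid_body (my_head : List (String × Int)) (my_body : List (List (String × Int))) (possible_moves : List String) : Prop :=
  my_body = [] ∨
    (PySem.Dict.contains ⟨my_head⟩ "x" = true ∧ PySem.Dict.contains ⟨my_head⟩ "y" = true ∧
     ∀ seg ∈ my_body, PySem.Dict.contains ⟨seg⟩ "x" = true ∧ PySem.Dict.contains ⟨seg⟩ "y" = true)
instance (my_head : List (String × Int)) (my_body : List (List (String × Int))) (possible_moves : List String) : Decidable (Pre_avoid_body my_head my_body possible_moves) := by unfold Pre_avoid_body; infer_instance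

def pvWitness_avoid_body : (List (String × Int)) × (List (List (String × Int))) × List String :=
  ([("x", 0), ("y", 0)], [[("x", 1), ("y", 0)], [("x", 0), ("y", -1)]], ["up", "right", "down", "right"])

def Spec_avoid_body (my_head : List (String × Int)) (my_body : List (List (String × Int))) (possible_moves : List String) (out : List String) : Prop := out = avoid_body_alt my_head my_body possible_moves
instance (my_head : List (String × Int)) (my_body : List (List (String × Int))) (possible_moves : List String) (out : List String) : Decidable (Spec_avoid_body my_head my_body possible_moves out) := by unfold Spec_avoid_body; infer_instance

-- ===== CLAIM (what is proved, stated in full; the proofs are below) =====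
def Claim_equal_avoid_body : Prop := ∀ (my_head : List (String × Int)) (my_body : List (List (String × Int))) (possible_moves : List String), Dom_avoid_body my_head my_body possible_moves → Pre_avoid_body my_head my_body possible_moves → Spec_avoid_body my_head my_body possible_moves (avoid_body my_head my_body possible_moves)

-- ===== LEMMAS AND PROOFS =====

theorem filter_ne_erase (pm : List String) (m : String) :
    (pm.erase m).filter (fun s => !(s == m)) = pm.filter (fun s => !(s == m)) := by
  induction pm with
  | nil => simp
  | cons a t ih =>
    by_cases h : a = m
    · subst h; simp [List.erase_cons_head]
    · rw [List.erase_cons_tail (by simpa using h)]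
      simp [h, ih]

theorem pvRemoveAll_eq_filter (pm : List String) (m : String) :
    pvRemoveAll pm m = pm.filter (fun s => !(s == m)) := by
  fun_induction pvRemoveAll pm m with
  | case1 pm h ih => rw [ih, filter_ne_erase]
  | case2 pm h =>
    have hnm : m ∉ pm := by simpa using h
    rw [List.filter_eq_self.mpr]
    intro a ha
    simp only [Bool.not_eq_eq_eq_not, Bool.not_true, beq_eq_false_iff_ne, ne_eq]
    exact fun hc => hnm (hc ▸ ha)

def pvHit (hx hy : Int) (seg : List (String × Int)) (s : String) : Bool :=
  let sx := PySem.Dict.getD ⟨seg⟩ "x" 0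
  let sy := PySem.Dict.getD ⟨seg⟩ "y" 0
  (hx + 1 == sx && hy == sy && s == "right") ||
  (hx - 1 == sx && hy == sy && s == "left") ||
  (hy + 1 == sy && hx == sx && s == "up") ||
  (hy - 1 == sy && hx == sx && s == "down")

theorem cond_removeAll_eq_filter (c : Bool) (t : String) (xs : List String) :
    (if c then pvRemoveAll xs t else xs) = xs.filter (fun s => !(c && s == t)) := by
  cases c <;> simp [pvRemoveAll_eq_filter]

theorem step_eq_filter (my_head : List (String × Int)) (seg : List (String × Int)) (pm : List String) :
    pvStep my_head pm seg
      = pm.filter (fun s => !pvHit (PySem.Dict.getD ⟨my_head⟩ "x" 0) (PySem.Dict.getD ⟨my_head⟩ "y" 0) seg s) := by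
  simp only [pvStep, cond_removeAll_eq_filter, List.filter_filter]
  apply List.filter_congr
  intro a _
  simp only [pvHit, Bool.not_or, Bool.and_assoc]
  ac_rfl

theorem foldl_filter_all {α β : Type} (f : β → α → Bool) (l : List β) (xs : List α) :
    l.foldl (fun acc b => acc.filter (f b)) xs = xs.filter (fun a => l.all (fun b => f b a)) := by
  induction l generalizing xs with
  | nil => simp
  | cons b t ih =>
    simp only [List.foldl_cons, ih, List.filter_filter, List.all_cons]
    exact List.filter_congr fun a _ => Bool.and_comm _ _

theorem avoid_body_eq_filter (my_head : List (String × Int)) (my_body : List (List (String × Int))) (possible_moves : List String) :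
    avoid_body my_head my_body possible_moves
      = possible_moves.filter (fun s =>
          my_body.all (fun seg => !pvHit (PySem.Dict.getD ⟨my_head⟩ "x" 0) (PySem.Dict.getD ⟨my_head⟩ "y" 0) seg s)) := by
  unfold avoid_body
  have h : pvStep my_head = fun pm seg =>
      pm.filter (fun s => !pvHit (PySem.Dict.getD ⟨my_head⟩ "x" 0) (PySem.Dict.getD ⟨my_head⟩ "y" 0) seg s) :=
    funext fun pm => funext fun seg => step_eq_filter my_head seg pm
  rw [h]
  exact foldl_filter_all _ _ _

theorem contains_toRemove (my_body : List (List (String × Int))) (x y : Int) (m : String) :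
    PySem.Set.contains (PySem.Set.ofList (((pvCands x y).filter (fun p => PySem.Set.contains (PySem.Set.ofList (my_body.map (fun seg => (PySem.Dict.getD ⟨seg⟩ "x" 0, PySem.Dict.getD ⟨seg⟩ "y" 0)))) p.2)).map Prod.fst)) m
      = my_body.any (fun seg => pvHit x y seg m) := by
  rw [Bool.eq_iff_iff, PySem.Set.contains_iff, PySem.Set.mem_ofList, List.any_eq_true]
  constructor
  · intro hm
    obtain ⟨p, hp2, hpm⟩ := List.mem_map.mp hm
    obtain ⟨hp, hb⟩ := List.mem_filter.mp hp2
    rw [PySem.Set.contains_iff, PySem.Set.mem_ofList] at hb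
    obtain ⟨seg, hseg, hc⟩ := List.mem_map.mp hb
    refine ⟨seg, hseg, ?_⟩
    subst hpm
    simp only [pvCands, List.mem_cons, List.not_mem_nil, or_false] at hp
    rw [Prod.ext_iff] at hc
    rcases hp with rfl | rfl | rfl | rfl <;> simp_all [pvHit]
  · rintro ⟨seg, hseg, hhit⟩
    simp only [pvHit, Bool.or_eq_true, Bool.and_eq_true, beq_iff_eq] at hhit
    apply List.mem_map.mpr
    have hmem : ∀ c : Int × Int, (∃ s ∈ my_body, (PySem.Dict.getD ⟨s⟩ "x" 0, PySem.Dict.getD ⟨s⟩ "y" 0) = c) →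
        PySem.Set.contains (PySem.Set.ofList (my_body.map (fun seg => (PySem.Dict.getD ⟨seg⟩ "x" 0, PySem.Dict.getD ⟨seg⟩ "y" 0)))) c = true := by
      intro c hc
      rw [PySem.Set.contains_iff, PySem.Set.mem_ofList]
      exact List.mem_map.mpr hc
    rcases hhit with ((⟨⟨h1, h2⟩, rfl⟩ | ⟨⟨h1, h2⟩, rfl⟩) | ⟨⟨h1, h2⟩, rfl⟩) | ⟨⟨h1, h2⟩, rfl⟩
    · exact ⟨("right", (x + 1, y)), List.mem_filter.mpr ⟨by simp [pvCands], hmem _ ⟨seg, hseg, by simp [← h1, ← h2]⟩⟩, rfl⟩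
    · exact ⟨("left", (x - 1, y)), List.mem_filter.mpr ⟨by simp [pvCands], hmem _ ⟨seg, hseg, by simp [← h1, ← h2]⟩⟩, rfl⟩
    · exact ⟨("up", (x, y + 1)), List.mem_filter.mpr ⟨by simp [pvCands], hmem _ ⟨seg, hseg, by simp [← h1, ← h2]⟩⟩, rfl⟩
    · exact ⟨("down", (x, y - 1)), List.mem_filter.mpr ⟨by simp [pvCands], hmem _ ⟨seg, hseg, by simp [← h1, ← h2]⟩⟩, rfl⟩

-- ===== VERDICT (by name: the statement is the Claim_ definition above) =====
theorem avoid_body_spec : Claim_equal_avoid_body := by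
  intro my_head my_body possible_moves _ _
  unfold Spec_avoid_body
  rw [avoid_body_eq_filter]
  by_cases hb : my_body.isEmpty
  · rw [List.isEmpty_iff] at hb
    subst hb
    simp [avoid_body_alt]
  · simp only [avoid_body_alt, hb, Bool.false_eq_true, if_false]
    apply List.filter_congr
    intro m _
    rw [contains_toRemove]
    rw [List.all_eq_not_any_not]
    simp
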